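-- pv_equiv track=rewrite | github.com/PinkPR/Metaheuristics | part2/functions.py | f
-- ===== SOURCE A (Python) =====
-- import copy
--
-- def f(n, backs):
-- 	if n == 0:
-- 		return backs
--
-- 	result_sets = []
--
-- 	if backs == None:
-- 		for i in range(-1, 2):
-- 			result_sets.append([i])
-- 	else:
-- 		for x in backs:
-- 			for i in range(-1, 2):
-- 				new_back = copy.deepcopy(x)
-- 				new_back.append(i)
-- 				result_sets.append(new_back)
--
-- 	return f(n - 1, result_sets)
-- ===== SOURCE B (Python) =====
-- def f(n, backs):
--     if n == 0:
--         return backs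
--     if backs is None:
--         result = [[-1], [0], [1]]
--         steps = n - 1
--     else:
--         result = backs
--         steps = n
--     for _ in range(steps):
--         result = [x + [i] for x in result for i in range(-1, 2)]
--     return result
-- ===== Notes on version B (the rewrite author's own statement) =====
-- stated objective: simpler
-- what changed: Replaces A's recursion with deepcopy-per-element appends by a single iterative loop that rebuilds the level with a flat list comprehension (shallow x+[i]).
-- outside the precondition, e.g. on f(0, None): A returns None, B returns None; on f(-1, None): A does not finish within the time limit, B returns [[-1], [0], [1]]
import Mathlib
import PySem

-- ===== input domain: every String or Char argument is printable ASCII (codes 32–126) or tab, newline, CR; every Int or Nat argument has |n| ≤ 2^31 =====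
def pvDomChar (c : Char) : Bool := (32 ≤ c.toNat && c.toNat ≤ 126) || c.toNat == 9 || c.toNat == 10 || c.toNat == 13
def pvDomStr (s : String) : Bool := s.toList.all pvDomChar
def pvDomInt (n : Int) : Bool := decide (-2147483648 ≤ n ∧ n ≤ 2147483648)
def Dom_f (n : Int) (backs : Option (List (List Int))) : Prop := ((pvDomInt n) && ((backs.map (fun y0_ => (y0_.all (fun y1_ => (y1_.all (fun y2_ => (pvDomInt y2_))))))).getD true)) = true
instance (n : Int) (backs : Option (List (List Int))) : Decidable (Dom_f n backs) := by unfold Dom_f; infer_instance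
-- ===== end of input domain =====

-- B replaces A's recursion (deepcopy + append per element) by one iterative loop over a flat
-- list comprehension; equivalence is about the RETURN value (A never mutates its arguments).

-- ===== PORT A =====
-- A recurses with n decreasing by 1; on Pre_ we have 0 ≤ n, so the recursion is modelled by
-- structural recursion on the Nat fuel n.toNat (exact for all n ≥ 0; n < 0 diverges in Python
-- and is excluded by Pre_). At fuel 0 with backs = none Python returns None (not a list of
-- lists); that input is excluded by Pre_ and the port returns [] there.
def fA : Nat → Option (List (List Int)) → List (List Int)
  | 0, backs => backs.getD []
  | Nat.succ m, backs =>
      let result_sets : List (List Int) :=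
        match backs with
        | none => (PySem.List.pyRange (-1) 2 1).foldl (fun acc i => acc ++ [[i]]) []
        | some bs =>
            bs.foldl (fun acc x =>
              (PySem.List.pyRange (-1) 2 1).foldl (fun acc2 i => acc2 ++ [x ++ [i]]) acc) []
      fA m (some result_sets)

def f (n : Int) (backs : Option (List (List Int))) : List (List Int) := fA n.toNat backs

-- ===== PORT B =====
def f_alt (n : Int) (backs : Option (List (List Int))) : List (List Int) :=
  if n = 0 then backs.getD [] else
  let init : List (List Int) × Int :=
    match backs with
    | none => ([[-1], [0], [1]], n - 1)
    | some bs => (bs, n)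
  (List.range init.2.toNat).foldl
    (fun result _ => result.flatMap (fun x => (PySem.List.pyRange (-1) 2 1).map (fun i => x ++ [i])))
    init.1

-- ===== PRECONDITION & SPEC =====
-- Pre_ excludes n < 0 (A recurses forever, never returning) and n = 0 with backs = None
-- (A returns None, which is not a value of the declared list-of-lists type).
def Pre_f (n : Int) (backs : Option (List (List Int))) : Prop :=
  0 ≤ n ∧ (n = 0 → backs ≠ none)
instance (n : Int) (backs : Option (List (List Int))) : Decidable (Pre_f n backs) := by
  unfold Pre_f; infer_instance
def pvWitness_f : Int × Option (List (List Int)) := (2, some [[1], [0, 2]])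
def Spec_f (n : Int) (backs : Option (List (List Int))) (out : List (List Int)) : Prop := out = f_alt n backs
instance (n : Int) (backs : Option (List (List Int))) (out : List (List Int)) : Decidable (Spec_f n backs out) := by unfold Spec_f; infer_instance

-- ===== CLAIM (what is proved, stated in full; the proofs are below) =====
def Claim_equal_f : Prop := ∀ (n : Int) (backs : Option (List (List Int))), Dom_f n backs → Pre_f n backs → Spec_f n backs (f n backs)

-- ===== LEMMAS AND PROOFS =====

-- one expansion level, as B computes it
def pvStep (bs : List (List Int)) : List (List Int) :=
  bs.flatMap (fun x => (PySem.List.pyRange (-1) 2 1).map (fun i => x ++ [i]))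

theorem pvRange_eval : PySem.List.pyRange (-1) 2 1 = [-1, 0, 1] := by decide

-- A's inner append-loop over one x equals the mapped block
theorem pvInner (x : List Int) (acc : List (List Int)) :
    (PySem.List.pyRange (-1) 2 1).foldl (fun acc2 i => acc2 ++ [x ++ [i]]) acc
      = acc ++ (PySem.List.pyRange (-1) 2 1).map (fun i => x ++ [i]) := by
  rw [pvRange_eval]; simp [List.foldl]

-- A's outer loop over backs equals pvStep
theorem pvOuter (bs : List (List Int)) (acc : List (List Int)) :
    bs.foldl (fun acc x =>
        (PySem.List.pyRange (-1) 2 1).foldl (fun acc2 i => acc2 ++ [x ++ [i]]) acc) acc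
      = acc ++ pvStep bs := by
  induction bs generalizing acc with
  | nil => simp [pvStep]
  | cons x xs ih =>
      rw [List.foldl_cons, pvInner, ih]
      simp [pvStep, List.flatMap_cons, List.append_assoc]

theorem pvFA_some (m : Nat) (bs : List (List Int)) :
    fA m (some bs) = pvStep^[m] bs := by
  induction m generalizing bs with
  | zero => simp [fA]
  | succ k ih =>
      simp only [fA, pvOuter, List.nil_append, ih, Function.iterate_succ_apply]

theorem pvFoldl_iterate (m : Nat) (bs : List (List Int)) :
    (List.range m).foldl (fun result _ => pvStep result) bs = pvStep^[m] bs := by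
  induction m generalizing bs with
  | zero => simp
  | succ k ih =>
      rw [List.range_succ, List.foldl_append, ih]
      exact (Function.iterate_succ_apply' pvStep k bs).symm

-- ===== VERDICT (by name: the statement is the Claim_ definition above) =====
theorem f_spec : Claim_equal_f := by
  intro n backs _ hpre
  obtain ⟨hn, h0⟩ := hpre
  unfold Spec_f f f_alt
  by_cases hz : n = 0
  · subst hz
    cases backs with
    | none => exact absurd rfl (h0 rfl)
    | some bs => simp [fA]
  · have hn1 : 1 ≤ n := by omega
    obtain ⟨m, hm⟩ : ∃ m : Nat, n.toNat = m + 1 := ⟨n.toNat - 1, by omega⟩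
    simp only [if_neg hz]
    cases backs with
    | none =>
        have h1 : (n - 1).toNat = m := by omega
        show fA n.toNat none
            = (List.range (n - 1).toNat).foldl (fun result _ => pvStep result) [[-1], [0], [1]]
        rw [hm, h1, pvFoldl_iterate]
        simp only [fA]
        rw [pvFA_some]
        congr 1
    | some bs =>
        show fA n.toNat (some bs)
            = (List.range n.toNat).foldl (fun result _ => pvStep result) bs
        rw [pvFoldl_iterate, pvFA_some]
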